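-- pv_equiv track=rewrite | github.com/AdityaSharma2485/Leetcode | 2285. Maximum Total Importance of Roads.py | maximumImportance
-- ===== SOURCE A (Python) =====
-- from typing import List
--
-- def maximumImportance(n: int, roads: List[List[int]]) -> int:
--     from collections import defaultdict
--
--     # Step 1: Calculate the degree of each city
--     degree = [0] * n
--     for road in roads:
--         degree[road[0]] += 1
--         degree[road[1]] += 1
--
--     # Step 2: Sort cities by their degree in descending order
--     city_degree_pairs = [(degree[i], i) for i in range(n)]
--     city_degree_pairs.sort(reverse=True)
--
--     # Step 3: Assign values based on sorted order
--     value_assignment = [0] * n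
--     current_value = n
--     for _, city in city_degree_pairs:
--         value_assignment[city] = current_value
--         current_value -= 1
--
--     # Step 4: Calculate the total importance of all roads
--     total_importance = 0
--     for road in roads:
--         total_importance += value_assignment[road[0]] + value_assignment[road[1]]
--
--     return total_importance
-- ===== SOURCE B (Python) =====
-- from typing import List
--
-- def maximumImportance(n: int, roads: List[List[int]]) -> int:
--     # Same degree count; then instead of sorting (degree, city) pairs, building a
--     # value_assignment array and re-scanning the roads, weight the nonzero degrees
--     # directly: sorted descending they get the values n, n-1, ... (cities with
--     # degree 0 contribute nothing, whatever value they receive).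
--     degree = [0] * n
--     for road in roads:
--         degree[road[0]] += 1
--         degree[road[1]] += 1
--     total = 0
--     value = n
--     for d in sorted((d for d in degree if d), reverse=True):
--         total += d * value
--         value -= 1
--     return total
-- ===== Notes on version B (the rewrite author's own statement) =====
-- stated objective: faster
-- what changed: Keeps the degree-count loop but drops the (degree,city) pair sort, the value_assignment array and the second scan over the roads: B sorts only the nonzero degrees (descending) and weights them n, n-1, ..., since zero-degree cities contribute nothing.
import Mathlib
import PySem

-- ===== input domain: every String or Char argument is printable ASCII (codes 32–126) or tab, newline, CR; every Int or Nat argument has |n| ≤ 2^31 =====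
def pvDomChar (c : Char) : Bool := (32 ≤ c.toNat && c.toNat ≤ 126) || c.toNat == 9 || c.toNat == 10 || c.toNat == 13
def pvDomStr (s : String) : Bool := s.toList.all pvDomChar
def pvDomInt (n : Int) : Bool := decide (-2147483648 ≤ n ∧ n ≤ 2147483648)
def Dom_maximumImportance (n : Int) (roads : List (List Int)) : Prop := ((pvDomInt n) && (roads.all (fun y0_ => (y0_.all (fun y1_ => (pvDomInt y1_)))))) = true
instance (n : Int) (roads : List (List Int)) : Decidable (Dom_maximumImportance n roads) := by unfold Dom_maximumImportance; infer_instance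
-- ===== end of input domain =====

-- B drops A's (degree,city) pair sort, value_assignment array and second road scan:
-- it sorts only the nonzero degrees (descending) and weights them n, n-1, … (objective: faster).

-- ===== PORT A =====
-- Python lists are O(1)-update arrays, so both ports keep their int lists in a Lean Array;
-- pvAGetD / pvASetD are exactly PySem.List.pyGetD / pySetD on .toList (bridge lemmas below).
def pvAGetD (a : Array Int) (i d : Int) : Int :=
  match PySem.List.pyIdx? a.size i with
  | some k => a.getD k d
  | none => d

def pvASetD (a : Array Int) (i v : Int) : Array Int :=
  match PySem.List.pyIdx? a.size i with
  | some k => a.setIfInBounds k v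
  | none => a

-- degree loop (step 1 of A; Source B's first loop is the identical code, so both ports share it)
def pvDegree (n : Int) (roads : List (List Int)) : Array Int :=
  roads.foldl (fun d road =>
    let d1 := pvASetD d (PySem.List.pyGetD road 0 0)
                (pvAGetD d (PySem.List.pyGetD road 0 0) 0 + 1)
    pvASetD d1 (PySem.List.pyGetD road 1 0)
      (pvAGetD d1 (PySem.List.pyGetD road 1 0) 0 + 1))
    (Array.replicate n.toNat 0)

def maximumImportance (n : Int) (roads : List (List Int)) : Int :=
  let degree := pvDegree n roads
  let pairs := (PySem.List.pyRange 0 n).map (fun i => (pvAGetD degree i 0, i))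
  let cdp := PySem.List.sorted2 pairs (fun p => p.1) (fun p => p.2) true
  let va := (cdp.foldl (fun (st : Array Int × Int) p => (pvASetD st.1 p.2 st.2, st.2 - 1))
              (Array.replicate n.toNat 0, n)).1
  roads.foldl (fun t road =>
    t + (pvAGetD va (PySem.List.pyGetD road 0 0) 0
         + pvAGetD va (PySem.List.pyGetD road 1 0) 0)) 0

-- ===== PORT B =====
def maximumImportance_alt (n : Int) (roads : List (List Int)) : Int :=
  let degree := pvDegree n roads
  ((PySem.List.sorted (degree.toList.filter (fun d => d != 0)) (fun x => x) true).foldl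
      (fun (st : Int × Int) d => (st.1 + d * st.2, st.2 - 1)) (0, n)).1

-- ===== PRECONDITION & SPEC =====
-- Pre_ excludes exactly the inputs on which the Python A raises IndexError: a road with
-- fewer than two entries, or a road endpoint outside [-n, n).
def Pre_maximumImportance (n : Int) (roads : List (List Int)) : Prop :=
  ∀ r ∈ roads, 2 ≤ r.length ∧ PySem.Raise.InRange n.toNat (r.getD 0 0)
    ∧ PySem.Raise.InRange n.toNat (r.getD 1 0)
instance (n : Int) (roads : List (List Int)) : Decidable (Pre_maximumImportance n roads) := by
  unfold Pre_maximumImportance; infer_instance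

def pvWitness_maximumImportance : Int × List (List Int) := (2, [[0, 1]])

def Spec_maximumImportance (n : Int) (roads : List (List Int)) (out : Int) : Prop := out = maximumImportance_alt n roads
instance (n : Int) (roads : List (List Int)) (out : Int) : Decidable (Spec_maximumImportance n roads out) := by unfold Spec_maximumImportance; infer_instance

-- ===== CLAIM (what is proved, stated in full; the proofs are below) =====
def Claim_equal_maximumImportance : Prop := ∀ (n : Int) (roads : List (List Int)), Dom_maximumImportance n roads → Pre_maximumImportance n roads → Spec_maximumImportance n roads (maximumImportance n roads)

-- ===== LEMMAS AND PROOFS =====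

-- proof-side helpers ---------------------------------------------------------

-- list-level model of the degree update (one road)
def pvDegStep (d : List Int) (road : List Int) : List Int :=
  let d1 := PySem.List.pySetD d (PySem.List.pyGetD road 0 0)
              (PySem.List.pyGetD d (PySem.List.pyGetD road 0 0) 0 + 1)
  PySem.List.pySetD d1 (PySem.List.pyGetD road 1 0)
    (PySem.List.pyGetD d1 (PySem.List.pyGetD road 1 0) 0 + 1)

-- dot product, truncating at the shorter list
def pvDot : List Int → List Int → Int
  | x :: d, y :: v => x * y + pvDot d v
  | _, _ => 0

-- A's rank-weighted sum over the (descending) sorted pairs: c, c-1, ...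
def pvG : List (Int × Int) → Int → Int
  | [], _ => 0
  | p :: t, c => p.1 * c + pvG t (c - 1)

-- the same rank-weighted sum over a plain list of degrees
def pvGF : List Int → Int → Int
  | [], _ => 0
  | d :: t, c => d * c + pvGF t (c - 1)

-- the boolean lex strict order sorted2 uses on (Int × Int)
def pvLt (a b : Int × Int) : Bool :=
  decide (a.1 < b.1) || (!decide (b.1 < a.1) && decide (a.2 < b.2))

-- A's value-assignment fold, list level
def pvAssign (L : List (Int × Int)) (v : List Int) (c : Int) : List Int :=
  (L.foldl (fun (st : List Int × Int) p => (PySem.List.pySetD st.1 p.2 st.2, st.2 - 1)) (v, c)).1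

def pvNorm (m : Nat) (i : Int) : Nat := (PySem.List.pyIdx? m i).getD 0

-- Array/List bridges ---------------------------------------------------------

theorem pvAGetD_toList (a : Array Int) (i d : Int) :
    pvAGetD a i d = PySem.List.pyGetD a.toList i d := by
  unfold pvAGetD PySem.List.pyGetD PySem.List.pyGet?
  rw [Array.length_toList]
  cases h : PySem.List.pyIdx? a.size i with
  | none => simp
  | some k =>
    simp only [Option.bind_some]
    by_cases hk : k < a.size
    · simp [Array.getD, hk, Array.length_toList, Array.getElem_toList]
    · simp [Array.getD, hk, Array.length_toList]

theorem pvASetD_toList (a : Array Int) (i v : Int) :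
    (pvASetD a i v).toList = PySem.List.pySetD a.toList i v := by
  unfold pvASetD PySem.List.pySetD PySem.List.pySet?
  rw [Array.length_toList]
  cases h : PySem.List.pyIdx? a.size i with
  | none => simp
  | some k => simp [Array.toList_setIfInBounds]

theorem pvDegree_toList (n : Int) (roads : List (List Int)) :
    (pvDegree n roads).toList = roads.foldl pvDegStep (List.replicate n.toNat 0) := by
  unfold pvDegree
  rw [← Array.toList_replicate (n := n.toNat) (a := (0 : Int))]
  generalize Array.replicate n.toNat (0 : Int) = a
  induction roads generalizing a with
  | nil => rfl
  | cons r rs ih =>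
    rw [List.foldl_cons, List.foldl_cons, ih]
    congr 1
    simp [pvDegStep, pvASetD_toList, pvAGetD_toList]

-- index normalisation --------------------------------------------------------

theorem pvIdx_eq (m : Nat) (i : Int) (h : PySem.Raise.InRange m i) :
    PySem.List.pyIdx? m i = some (pvNorm m i) ∧ pvNorm m i < m := by
  rcases h with ⟨h1, h2⟩
  unfold pvNorm PySem.List.pyIdx?
  split_ifs <;> simp_all <;> omega

theorem pvGetD_norm (xs : List Int) (i : Int) (d : Int) (h : PySem.Raise.InRange xs.length i) :
    PySem.List.pyGetD xs i d = xs.getD (pvNorm xs.length i) d := by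
  obtain ⟨he, _⟩ := pvIdx_eq xs.length i h
  simp [PySem.List.pyGetD, PySem.List.pyGet?, he, List.getD_eq_getElem?_getD]

theorem pvSetD_norm (xs : List Int) (i : Int) (v : Int) (h : PySem.Raise.InRange xs.length i) :
    PySem.List.pySetD xs i v = xs.set (pvNorm xs.length i) v := by
  obtain ⟨he, _⟩ := pvIdx_eq xs.length i h
  simp [PySem.List.pySetD, PySem.List.pySet?, he]

-- degree loop, list level ----------------------------------------------------

theorem pvDegStep_length (d road : List Int) : (pvDegStep d road).length = d.length := by
  simp [pvDegStep, PySem.List.length_pySetD]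

theorem pvDegFold_length (roads : List (List Int)) : ∀ d : List Int,
    (roads.foldl pvDegStep d).length = d.length := by
  induction roads with
  | nil => intro d; rfl
  | cons r rs ih => intro d; simp [List.foldl_cons, ih, pvDegStep_length]

-- nonnegativity of the degree counts ----------------------------------------

theorem pvGetD_nonneg (xs : List Int) (i : Int) (h : ∀ j : Nat, 0 ≤ xs.getD j 0) :
    0 ≤ PySem.List.pyGetD xs i 0 := by
  unfold PySem.List.pyGetD PySem.List.pyGet?
  cases hi : PySem.List.pyIdx? xs.length i with
  | none => simp
  | some k =>
    have := h k
    simp only [Option.bind_some]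
    rw [List.getD_eq_getElem?_getD] at this
    exact this

theorem pvSetD_getD_nonneg (xs : List Int) (i v : Int) (h : ∀ j : Nat, 0 ≤ xs.getD j 0)
    (hv : 0 ≤ v) : ∀ j : Nat, 0 ≤ (PySem.List.pySetD xs i v).getD j 0 := by
  intro j
  unfold PySem.List.pySetD PySem.List.pySet?
  cases hi : PySem.List.pyIdx? xs.length i with
  | none => simpa using h j
  | some k =>
    simp only [Option.map_some, Option.getD_some]
    rw [List.getD_eq_getElem?_getD, List.getElem?_set]
    by_cases hkj : k = j
    · subst hkj
      by_cases hk : k < xs.length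
      · simp [hk, hv]
      · simp [hk]
    · have hh := h j
      rw [List.getD_eq_getElem?_getD] at hh
      simp [hkj, hh]

theorem pvDegStep_getD_nonneg (d road : List Int) (h : ∀ j : Nat, 0 ≤ d.getD j 0) :
    ∀ j : Nat, 0 ≤ (pvDegStep d road).getD j 0 := by
  unfold pvDegStep
  have h1 := pvSetD_getD_nonneg d (PySem.List.pyGetD road 0 0)
    (PySem.List.pyGetD d (PySem.List.pyGetD road 0 0) 0 + 1) h
    (by have := pvGetD_nonneg d (PySem.List.pyGetD road 0 0) h; omega)
  exact pvSetD_getD_nonneg _ _ _ h1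
    (by have := pvGetD_nonneg _ (PySem.List.pyGetD road 1 0) h1; omega)

theorem pvDegFold_getD_nonneg (roads : List (List Int)) : ∀ d : List Int,
    (∀ j : Nat, 0 ≤ d.getD j 0) → ∀ j : Nat, 0 ≤ (roads.foldl pvDegStep d).getD j 0 := by
  induction roads with
  | nil => intro d h; exact h
  | cons r rs ih => intro d h; exact ih (pvDegStep d r) (pvDegStep_getD_nonneg d r h)

theorem pvDegFold_mem_nonneg (roads : List (List Int)) (d : List Int)
    (h : ∀ j : Nat, 0 ≤ d.getD j 0) (x : Int) (hx : x ∈ roads.foldl pvDegStep d) : 0 ≤ x := by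
  obtain ⟨j, hj, rfl⟩ := List.mem_iff_getElem.mp hx
  have hnn := pvDegFold_getD_nonneg roads d h j
  rw [List.getD_eq_getElem?_getD, List.getElem?_eq_getElem hj] at hnn
  simpa using hnn

-- dot product lemmas ---------------------------------------------------------

theorem pvDot_replicate_zero : ∀ (m : Nat) (v : List Int), pvDot (List.replicate m 0) v = 0 := by
  intro m
  induction m with
  | zero => intro v; cases v <;> rfl
  | succ k ih => intro v; cases v with
    | nil => rfl
    | cons y v' => simp [List.replicate_succ, pvDot, ih]

theorem pvDot_set : ∀ (d v : List Int) (k : Nat) (x : Int), k < d.length → k < v.length →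
    pvDot (d.set k x) v = pvDot d v + (x - d.getD k 0) * v.getD k 0 := by
  intro d
  induction d with
  | nil => intro v k x h _; simp at h
  | cons a d' ih =>
    intro v k x hd hv
    cases v with
    | nil => simp at hv
    | cons b v' =>
      cases k with
      | zero => simp [pvDot, List.set]; ring
      | succ k' =>
        simp only [List.set, pvDot, List.getD_cons_succ, List.length_cons] at *
        rw [ih v' k' x (by omega) (by omega)]
        ring

theorem pvDot_eq_sum_range : ∀ (d v : List Int),
    pvDot d v = ((List.range d.length).map (fun k => d.getD k 0 * v.getD k 0)).sum := by
  intro d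
  induction d with
  | nil => intro v; simp [pvDot]
  | cons a d' ih =>
    intro v
    cases v with
    | nil =>
      simp [pvDot]
    | cons b v' =>
      simp only [pvDot, List.length_cons, List.range_succ_eq_map, List.map_cons, List.map_map,
        List.sum_cons, List.getD_cons_zero]
      rw [ih v']
      congr 1

-- handshake: dot of the built degrees against any fixed v ---------------------

theorem pvDeg_incr (d v road : List Int) (hlen : d.length = v.length)
    (h0 : PySem.Raise.InRange d.length (road.getD 0 0))
    (h1 : PySem.Raise.InRange d.length (road.getD 1 0)) :
    pvDot (pvDegStep d road) v
      = pvDot d v + (PySem.List.pyGetD v (PySem.List.pyGetD road 0 0) 0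
          + PySem.List.pyGetD v (PySem.List.pyGetD road 1 0) 0) := by
  have hg0 : PySem.List.pyGetD road 0 0 = road.getD 0 0 := PySem.List.pyGetD_zero road 0
  have hg1 : PySem.List.pyGetD road 1 0 = road.getD 1 0 := PySem.List.pyGetD_ofNat' road 1 0
  obtain ⟨he0, hk0⟩ := pvIdx_eq d.length (road.getD 0 0) h0
  obtain ⟨he1, hk1⟩ := pvIdx_eq d.length (road.getD 1 0) h1
  set k0 := pvNorm d.length (road.getD 0 0) with hkk0
  set k1 := pvNorm d.length (road.getD 1 0) with hkk1
  have hd1 : PySem.List.pySetD d (road.getD 0 0) (PySem.List.pyGetD d (road.getD 0 0) 0 + 1)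
      = d.set k0 (d.getD k0 0 + 1) := by
    rw [pvGetD_norm d _ _ h0, pvSetD_norm d _ _ h0]
  have hlen1 : (d.set k0 (d.getD k0 0 + 1)).length = d.length := by simp
  unfold pvDegStep
  simp only [hg0, hg1, hd1]
  rw [pvGetD_norm _ _ _ (by rw [hlen1]; exact h1), pvSetD_norm _ _ _ (by rw [hlen1]; exact h1)]
  have hnorm1 : pvNorm (d.set k0 (d.getD k0 0 + 1)).length (road.getD 1 0) = k1 := by
    rw [hlen1, hkk1]
  rw [hnorm1]
  rw [pvDot_set _ _ _ _ (by simp; omega) (by omega), pvDot_set _ _ _ _ hk0 (by omega)]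
  rw [pvGetD_norm v _ _ (by rw [← hlen]; exact h0), pvGetD_norm v _ _ (by rw [← hlen]; exact h1)]
  rw [hlen] at hkk0 hkk1
  rw [← hkk0, ← hkk1]
  ring

theorem pvHS : ∀ (roads : List (List Int)) (d v : List Int), d.length = v.length →
    (∀ r ∈ roads, PySem.Raise.InRange d.length (r.getD 0 0)
        ∧ PySem.Raise.InRange d.length (r.getD 1 0)) →
    pvDot (roads.foldl pvDegStep d) v
      = pvDot d v + (roads.map (fun r => PySem.List.pyGetD v (PySem.List.pyGetD r 0 0) 0
          + PySem.List.pyGetD v (PySem.List.pyGetD r 1 0) 0)).sum := by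
  intro roads
  induction roads with
  | nil => intro d v _ _; simp
  | cons r rs ih =>
    intro d v hlen hc
    have hr := hc r (by simp)
    have hlen' : (pvDegStep d r).length = d.length := pvDegStep_length d r
    simp only [List.foldl_cons, List.map_cons, List.sum_cons]
    rw [ih (pvDegStep d r) v (by rw [hlen', hlen])
      (by intro q hq; rw [hlen']; exact hc q (by simp [hq]))]
    rw [pvDeg_incr d v r hlen hr.1 hr.2]
    ring

-- value assignment -----------------------------------------------------------

theorem pvAssign_cons (p : Int × Int) (t : List (Int × Int)) (v : List Int) (c : Int) :
    pvAssign (p :: t) v c = pvAssign t (PySem.List.pySetD v p.2 c) (c - 1) := rfl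

theorem pvAssignArr_toList : ∀ (L : List (Int × Int)) (a : Array Int) (c : Int),
    ((L.foldl (fun (st : Array Int × Int) p => (pvASetD st.1 p.2 st.2, st.2 - 1)) (a, c)).1).toList
      = pvAssign L a.toList c := by
  intro L
  induction L with
  | nil => intro a c; rfl
  | cons p t ih =>
    intro a c
    rw [List.foldl_cons, pvAssign_cons, ← pvASetD_toList]
    exact ih (pvASetD a p.2 c) (c - 1)

theorem pvAssign_length : ∀ (L : List (Int × Int)) (v : List Int) (c : Int),
    (pvAssign L v c).length = v.length := by
  intro L
  induction L with
  | nil => intro v c; rfl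
  | cons p t ih => intro v c; rw [pvAssign_cons, ih, PySem.List.length_pySetD]

theorem pvAssign_untouched : ∀ (L : List (Int × Int)) (v : List Int) (c : Int) (j : Nat),
    (∀ p ∈ L, ∃ k : Nat, p.2 = (k : Int)) → ((j : Int)) ∉ L.map (·.2) →
    (pvAssign L v c).getD j 0 = v.getD j 0 := by
  intro L
  induction L with
  | nil => intro v c j _ _; rfl
  | cons p t ih =>
    intro v c j hk hj
    obtain ⟨k, hpk⟩ := hk p (by simp)
    rw [pvAssign_cons, ih _ _ _ (fun q hq => hk q (by simp [hq])) (by simp at hj; simp [hj.2])]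
    rw [hpk]
    simp only [PySem.List.pySetD_natCast]
    have hne : k ≠ j := by
      intro he; apply hj; simp [← he, ← hpk]
    rw [List.getD_eq_getElem?_getD, List.getD_eq_getElem?_getD, List.getElem?_set_ne hne]

theorem pvAssign_sum : ∀ (L : List (Int × Int)) (v : List Int) (c : Int),
    (∀ p ∈ L, ∃ k : Nat, p.2 = (k : Int) ∧ k < v.length) → (L.map (·.2)).Nodup →
    (L.map (fun p => p.1 * (pvAssign L v c).getD p.2.toNat 0)).sum = pvG L c := by
  intro L
  induction L with
  | nil => intro v c _ _; rfl
  | cons p t ih =>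
    intro v c hk hnd
    obtain ⟨k, hpk, hkv⟩ := hk p (by simp)
    simp only [List.map_cons, List.sum_cons, pvG, pvAssign_cons]
    have hnd' := (List.nodup_cons.mp hnd)
    have hset : PySem.List.pySetD v p.2 c = v.set k c := by
      rw [hpk]; simp
    congr 1
    · -- head term
      rw [pvAssign_untouched t _ (c - 1) (p.2.toNat)
        (fun q hq => (hk q (by simp [hq])).imp (fun _ h => h.1))
        (by rw [hpk]; simpa [hpk] using hnd'.1)]
      rw [hset, hpk]
      simp only [Int.toNat_natCast]
      rw [List.getD_eq_getElem?_getD, List.getElem?_set_self (by omega)]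
      simp
    · -- tail
      rw [hset]
      exact ih (v.set k c) (c - 1)
        (fun q hq => ((hk q (by simp [hq])).imp (fun _ h => ⟨h.1, by simpa using h.2⟩))) hnd'.2

-- insertion sort order -------------------------------------------------------

theorem pvPairwise_insertBy {α : Type} (before : α → α → Bool)
    (hasym : ∀ a b, before a b = true → before b a = false)
    (htrans : ∀ a b c, before a b = false → before b c = false → before a c = false) :
    ∀ (acc : List α) (x : α), acc.Pairwise (fun a b => before b a = false) →
      (PySem.List.insertBy before x acc).Pairwise (fun a b => before b a = false) := by
  intro acc
  induction acc with
  | nil => intro x _; simp [PySem.List.insertBy]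
  | cons y ys ih =>
    intro x hp
    rw [List.pairwise_cons] at hp
    by_cases hxy : before x y = true
    · simp only [PySem.List.insertBy, hxy, if_true]
      refine List.pairwise_cons.mpr ⟨?_, List.pairwise_cons.mpr ⟨hp.1, hp.2⟩⟩
      intro w hw
      rcases List.mem_cons.mp hw with rfl | hw'
      · exact hasym x w hxy
      · exact htrans w y x (hp.1 w hw') (hasym x y hxy)
    · simp only [PySem.List.insertBy, hxy]
      refine List.pairwise_cons.mpr ⟨?_, ih x hp.2⟩
      intro w hw
      rcases (PySem.List.mem_insertBy before x w ys).mp hw with rfl | hw'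
      · simpa using hxy
      · exact hp.1 w hw'

theorem pvPairwise_foldl_insertBy {α : Type} (before : α → α → Bool)
    (hasym : ∀ a b, before a b = true → before b a = false)
    (htrans : ∀ a b c, before a b = false → before b c = false → before a c = false)
    (xs : List α) : ∀ acc : List α, acc.Pairwise (fun a b => before b a = false) →
    (xs.foldl (fun acc x => PySem.List.insertBy before x acc) acc).Pairwise
      (fun a b => before b a = false) := by
  induction xs with
  | nil => intro acc h; exact h
  | cons x t ih => intro acc h; exact ih _ (pvPairwise_insertBy before hasym htrans acc x h)

theorem pvLt_eq_false_iff (a b : Int × Int) :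
    pvLt a b = false ↔ ¬(a.1 < b.1) ∧ (b.1 < a.1 ∨ ¬(a.2 < b.2)) := by
  by_cases h1 : a.1 < b.1 <;> by_cases h2 : b.1 < a.1 <;>
    by_cases h3 : a.2 < b.2 <;> simp_all [pvLt]

theorem pvLt_asymm (a b : Int × Int) : pvLt a b = true → pvLt b a = false := by
  simp only [pvLt]
  by_cases h1 : a.1 < b.1 <;> by_cases h2 : b.1 < a.1 <;>
    by_cases h3 : a.2 < b.2 <;> by_cases h4 : b.2 < a.2 <;> simp_all <;> omega

theorem pvLt_neg_trans (a b c : Int × Int) : pvLt a b = false → pvLt b c = false →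
    pvLt a c = false := by
  intro h1 h2
  rw [pvLt_eq_false_iff] at h1 h2 ⊢
  obtain ⟨h1a, h1b⟩ := h1
  obtain ⟨h2a, h2b⟩ := h2
  refine ⟨by omega, ?_⟩
  rcases h1b with hb | hb
  · left; omega
  · rcases h2b with hcb | hcb
    · left; omega
    · right; omega

theorem pvSorted2_pairwise (xs : List (Int × Int)) :
    (PySem.List.sorted2 xs (fun p => p.1) (fun p => p.2) true).Pairwise
      (fun a b => pvLt a b = false) := by
  have h := pvPairwise_foldl_insertBy (fun a b => pvLt b a)
    (fun a b h => pvLt_asymm b a h)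
    (fun a b c h1 h2 => pvLt_neg_trans c b a h2 h1)
    xs [] (by simp)
  exact h

-- rank-sum bookkeeping -------------------------------------------------------

theorem pvG_eq_pvGF : ∀ (L : List (Int × Int)) (c : Int), pvG L c = pvGF (L.map (·.1)) c := by
  intro L
  induction L with
  | nil => intro c; rfl
  | cons p t ih => intro c; simp [pvG, pvGF, ih]

theorem pvGF_append : ∀ (u w : List Int) (c : Int),
    pvGF (u ++ w) c = pvGF u c + pvGF w (c - u.length) := by
  intro u
  induction u with
  | nil => intro w c; simp [pvGF]
  | cons d t ih =>
    intro w c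
    simp only [List.cons_append, pvGF, ih, List.length_cons]
    rw [show c - 1 - (t.length : Int) = c - ((t.length : Int) + 1) by ring]
    push_cast
    ring

theorem pvGF_replicate_zero : ∀ (z : Nat) (c : Int), pvGF (List.replicate z 0) c = 0 := by
  intro z
  induction z with
  | zero => intro c; rfl
  | succ k ih => intro c; simp [List.replicate_succ, pvGF, ih]

theorem pvFold_eq_pvGF : ∀ (D : List Int) (t c : Int),
    (D.foldl (fun (st : Int × Int) d => (st.1 + d * st.2, st.2 - 1)) (t, c)).1 = t + pvGF D c := by
  intro D
  induction D with
  | nil => intro t c; simp [pvGF]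
  | cons d D' ih =>
    intro t c
    simp only [List.foldl_cons, pvGF]
    rw [ih]
    ring

-- main equivalence on nonnegative n ------------------------------------------

theorem pvMain (m : Nat) (roads : List (List Int))
    (hpre : ∀ r ∈ roads, 2 ≤ r.length ∧ PySem.Raise.InRange ((m : Int)).toNat (r.getD 0 0)
      ∧ PySem.Raise.InRange ((m : Int)).toNat (r.getD 1 0)) :
    maximumImportance (m : Int) roads = maximumImportance_alt (m : Int) roads := by
  have htn : ((m : Int)).toNat = m := Int.toNat_natCast m
  set degL : List Int := (pvDegree (m : Int) roads).toList with hdegL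
  have hfoldL : degL = roads.foldl pvDegStep (List.replicate m 0) := by
    rw [hdegL, pvDegree_toList, htn]
  have hdlen : degL.length = m := by
    rw [hfoldL, pvDegFold_length]; simp
  set pairs : List (Int × Int) :=
    (PySem.List.pyRange 0 (m : Int)).map (fun i => (PySem.List.pyGetD degL i 0, i)) with hpairs
  set sp : List (Int × Int) := PySem.List.sorted2 pairs (fun p => p.1) (fun p => p.2) true with hspd
  set v0 : List Int := List.replicate ((m : Int)).toNat (0 : Int) with hv0
  have hv0len : v0.length = m := by rw [hv0]; simp [htn]
  set va : List Int := pvAssign sp v0 (m : Int) with hvad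
  have hvalen : va.length = m := by rw [hvad, pvAssign_length, hv0len]
  -- the port's array pairs are the list pairs
  have hpairs_eq : (PySem.List.pyRange 0 (m : Int)).map
        (fun i => (pvAGetD (pvDegree (m : Int) roads) i 0, i)) = pairs := by
    rw [hpairs]
    apply List.map_congr_left
    intro i _
    rw [pvAGetD_toList, hdegL]
  -- A unfolded to a road scan over the list-level value assignment
  have hA : maximumImportance (m : Int) roads
      = roads.foldl (fun t road => t + (PySem.List.pyGetD va (PySem.List.pyGetD road 0 0) 0
          + PySem.List.pyGetD va (PySem.List.pyGetD road 1 0) 0)) 0 := by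
    simp only [maximumImportance]
    rw [hpairs_eq, ← hspd]
    have hWL : ((sp.foldl (fun (st : Array Int × Int) p => (pvASetD st.1 p.2 st.2, st.2 - 1))
        (Array.replicate ((m : Int)).toNat 0, (m : Int))).1).toList = va := by
      rw [pvAssignArr_toList, Array.toList_replicate, hvad, hv0]
    have hf : (fun (t : Int) (road : List Int) =>
          t + (pvAGetD ((sp.foldl (fun (st : Array Int × Int) p =>
              (pvASetD st.1 p.2 st.2, st.2 - 1)) (Array.replicate ((m : Int)).toNat 0, (m : Int))).1)
            (PySem.List.pyGetD road 0 0) 0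
          + pvAGetD ((sp.foldl (fun (st : Array Int × Int) p =>
              (pvASetD st.1 p.2 st.2, st.2 - 1)) (Array.replicate ((m : Int)).toNat 0, (m : Int))).1)
            (PySem.List.pyGetD road 1 0) 0))
        = (fun t road => t + (PySem.List.pyGetD va (PySem.List.pyGetD road 0 0) 0
          + PySem.List.pyGetD va (PySem.List.pyGetD road 1 0) 0)) := by
      funext t road
      rw [pvAGetD_toList, pvAGetD_toList, hWL]
    rw [hf]
  have h1 : maximumImportance (m : Int) roads
      = (roads.map (fun r => PySem.List.pyGetD va (PySem.List.pyGetD r 0 0) 0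
          + PySem.List.pyGetD va (PySem.List.pyGetD r 1 0) 0)).sum := by
    rw [hA, PySem.List.foldl_add]; ring
  -- handshake
  have h2 : pvDot degL va
      = (roads.map (fun r => PySem.List.pyGetD va (PySem.List.pyGetD r 0 0) 0
          + PySem.List.pyGetD va (PySem.List.pyGetD r 1 0) 0)).sum := by
    have hrep : (List.replicate m (0 : Int)).length = va.length := by simp [hvalen]
    rw [hfoldL, pvHS roads (List.replicate m 0) va hrep
      (by intro r hr
          have h := hpre r hr
          have : (List.replicate m (0 : Int)).length = ((m : Int)).toNat := by simp [htn]
          rw [this]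
          exact ⟨h.2.1, h.2.2⟩)]
    rw [pvDot_replicate_zero, zero_add]
  -- dot as sum over pairs
  have h3 : pvDot degL va = (pairs.map (fun p => p.1 * PySem.List.pyGetD va p.2 0)).sum := by
    rw [pvDot_eq_sum_range, hdlen, hpairs, PySem.List.pyRange_zero_natCast, List.map_map,
      List.map_map]
    apply congrArg
    apply List.map_congr_left
    intro k _
    simp [PySem.List.pyGetD_natCast]
  have hperm : sp.Perm pairs := by
    rw [hspd]; exact PySem.List.sorted2_perm pairs (fun p => p.1) (fun p => p.2) true
  have h4 : (pairs.map (fun p => p.1 * PySem.List.pyGetD va p.2 0)).sum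
      = (sp.map (fun p => p.1 * PySem.List.pyGetD va p.2 0)).sum :=
    ((hperm.map (fun p => p.1 * PySem.List.pyGetD va p.2 0)).sum_eq).symm
  -- facts about the snd components of sp
  have hsnd : ∀ p ∈ sp, ∃ k : Nat, p.2 = (k : Int) ∧ k < m := by
    intro p hp
    have hp' : p ∈ pairs := hperm.mem_iff.mp hp
    rw [hpairs] at hp'
    obtain ⟨i, hi, rfl⟩ := List.mem_map.mp hp'
    rw [PySem.List.pyRange_zero_natCast] at hi
    obtain ⟨k, hk, rfl⟩ := List.mem_map.mp hi
    exact ⟨k, rfl, List.mem_range.mp hk⟩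
  have hnodup : (sp.map (·.2)).Nodup := by
    have hps : pairs.map (·.2) = PySem.List.pyRange 0 (m : Int) := by
      rw [hpairs, List.map_map]
      show (PySem.List.pyRange 0 (m : Int)).map (fun i => i) = PySem.List.pyRange 0 (m : Int)
      simp
    have hp2 : (pairs.map (·.2)).Nodup := by
      rw [hps, PySem.List.pyRange_zero_natCast]
      exact List.nodup_range.map (fun a b h => by exact_mod_cast h)
    exact ((hperm.map (·.2)).nodup_iff).mpr hp2
  have h5 : (sp.map (fun p => p.1 * PySem.List.pyGetD va p.2 0)).sum = pvG sp (m : Int) := by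
    have hcg : sp.map (fun p => p.1 * PySem.List.pyGetD va p.2 0)
        = sp.map (fun p => p.1 * (pvAssign sp v0 (m : Int)).getD p.2.toNat 0) := by
      apply List.map_congr_left
      intro p hp
      obtain ⟨k, hk, _⟩ := hsnd p hp
      rw [hvad, hk, PySem.List.pyGetD_natCast]
      simp
    rw [hcg]
    exact pvAssign_sum sp v0 (m : Int)
      (fun p hp => (hsnd p hp).imp (fun k h => ⟨h.1, by rw [hv0len]; exact h.2⟩)) hnodup
  -- the first components of sp are the degrees, descending
  have hpw : sp.Pairwise (fun a b => pvLt a b = false) := by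
    rw [hspd]; exact pvSorted2_pairwise pairs
  have hp1 : pairs.map (·.1) = degL := by
    rw [hpairs, List.map_map]
    have he : ((·.1 : Int × Int → Int) ∘ fun i => (PySem.List.pyGetD degL i 0, i))
        = fun j => PySem.List.pyGetD degL j 0 := rfl
    rw [he]
    have hl : (m : Int) = PySem.List.len degL := by
      simp [PySem.List.len, hdlen]
    rw [hl]
    exact PySem.List.map_pyGetD_pyRange_zero degL 0
  -- B's sorted nonzero degrees, padded with the zero entries, equal sp.map fst
  set D : List Int := PySem.List.sorted (degL.filter (fun d => d != 0)) (fun x => x) true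
    with hD
  set zeros : List Int := degL.filter (fun d => !(d != 0)) with hzeros
  have hdeg_nonneg : ∀ x ∈ degL, 0 ≤ x := by
    intro x hx
    rw [hfoldL] at hx
    exact pvDegFold_mem_nonneg roads (List.replicate m 0) (by intro j; simp [List.getD]) x hx
  have hzrep : zeros = List.replicate zeros.length 0 := by
    apply List.eq_replicate_of_mem
    intro b hb
    have := (List.mem_filter.mp (hzeros ▸ hb)).2
    simpa using this
  have hSD : sp.map (·.1) = D ++ zeros := by
    apply PySem.List.eq_of_perm_of_pairwise_le_of_injective (fun x : Int => -x) neg_injective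
    · -- permutation
      have hsperm : (sp.map (·.1)).Perm degL := by
        have := hperm.map (·.1)
        rwa [hp1] at this
      have hdz : (D ++ zeros).Perm degL :=
        ((PySem.List.sorted_perm _ _ _).append (List.Perm.refl _)).trans
          (List.filter_append_perm (fun d => d != 0) degL)
      exact hsperm.trans hdz.symm
    · -- sp.map fst is descending
      rw [List.pairwise_map]
      exact hpw.imp (fun {a b} h => by
        have := (pvLt_eq_false_iff a b).mp h
        omega)
    · -- D ++ zeros is descending
      rw [List.pairwise_append]
      refine ⟨?_, ?_, ?_⟩
      · have := PySem.List.sorted_pairwise_rev (degL.filter (fun d => d != 0)) (fun x => x)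
        rw [← hD] at this
        exact this.imp (fun {a b} h => by omega)
      · rw [hzrep]
        exact List.pairwise_replicate.mpr (by simp)
      · intro x hx y hy
        have hy0 : y = 0 := by
          rw [hzrep] at hy
          exact List.eq_of_mem_replicate hy
        have hxf : x ∈ degL.filter (fun d => d != 0) := by
          rw [hD, PySem.List.mem_sorted] at hx
          exact hx
        have hx0 : 0 ≤ x := hdeg_nonneg x (List.mem_filter.mp hxf).1
        omega
  -- B unfolded
  have hB : maximumImportance_alt (m : Int) roads = pvGF D (m : Int) := by
    simp only [maximumImportance_alt]
    rw [← hdegL, ← hD, pvFold_eq_pvGF, zero_add]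
  -- assemble
  rw [h1, ← h2, h3, h4, h5, hB, pvG_eq_pvGF, hSD, pvGF_append, hzrep,
    pvGF_replicate_zero, add_zero]

-- ===== VERDICT (by name: the statement is the Claim_ definition above) =====
theorem maximumImportance_spec : Claim_equal_maximumImportance := by
  intro n roads _ hpre
  unfold Spec_maximumImportance
  by_cases hn : 0 ≤ n
  · obtain ⟨m, rfl⟩ := Int.eq_ofNat_of_zero_le hn
    exact pvMain m roads hpre
  · rw [not_le] at hn
    have hz : n.toNat = 0 := Int.toNat_eq_zero.mpr (le_of_lt hn)
    cases roads with
    | nil =>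
      show maximumImportance n [] = maximumImportance_alt n []
      simp only [maximumImportance, maximumImportance_alt, pvDegree, hz, List.foldl_nil]
      rfl
    | cons r rs =>
      exfalso
      obtain ⟨_, h0, _⟩ := hpre r (by simp)
      rw [hz] at h0
      simp only [PySem.Raise.InRange] at h0
      omega
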